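-- pv_equiv track=rewrite | github.com/haya14busa/checkio | Library2.0/06_the_end_of_other.py | is_contain_end_of_other
-- ===== SOURCE A (Python) =====
-- def is_contain_end_of_other(words_set):
--     if len(words_set) < 2:
--         return False
--     for suffix in words_set:
--         # set('deco') # -> set(['c', 'e', 'd', 'o'])
--         # {'deco'} # -> set(['deco'])
--         for word in words_set - {suffix}:
--             if word.endswith(suffix):
--                 return True
--     return False
-- ===== SOURCE B (Python) =====
-- def is_contain_end_of_other(words_set):
--     revs = sorted(w[::-1] for w in words_set)
--     for a, b in zip(revs, revs[1:]):
--         if b.startswith(a):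
--             return True
--     return False
-- ===== Notes on version B (the rewrite author's own statement) =====
-- stated objective: alternative
-- what changed: A scans all ordered pairs (suffix, word) of the set with a fresh set-difference per suffix and tests word.endswith(suffix); B instead sorts the reversed words once and returns True iff some reversed word is a prefix of its immediate successor in sorted order (trades A's quadratic pair scan with early exit for one O(n log n) sort plus a single adjacent-pair pass).
import Mathlib
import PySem

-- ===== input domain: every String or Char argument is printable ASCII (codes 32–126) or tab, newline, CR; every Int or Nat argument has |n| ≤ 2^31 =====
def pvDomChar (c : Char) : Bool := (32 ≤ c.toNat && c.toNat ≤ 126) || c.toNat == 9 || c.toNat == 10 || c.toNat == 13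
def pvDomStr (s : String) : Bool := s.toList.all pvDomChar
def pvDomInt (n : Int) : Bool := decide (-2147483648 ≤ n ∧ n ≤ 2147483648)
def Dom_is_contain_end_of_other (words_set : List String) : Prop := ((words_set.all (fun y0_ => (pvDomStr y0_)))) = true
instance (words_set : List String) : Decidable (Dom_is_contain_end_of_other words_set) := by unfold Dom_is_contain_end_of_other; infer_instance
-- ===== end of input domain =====

-- B replaces A's all-pairs endswith scan by a different algorithm: sort the reversed words
-- once and check only ADJACENT pairs for a prefix (objective: alternative).

-- ===== PORT A =====
-- for suffix in words_set: for word in words_set - {suffix}: if word.endswith(suffix): return True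
def is_contain_end_of_other (words_set : List String) : Bool :=
  if words_set.length < 2 then false
  else words_set.any (fun suffix =>
    (PySem.Set.diff words_set [suffix]).any (fun word => PySem.Str.endswith word suffix))

-- ===== PORT B =====
-- w[::-1]
def pvRev (w : String) : String := (PySem.Str.slice? w none none (-1)).getD w

-- for a, b in zip(revs, revs[1:]): if b.startswith(a): return True ... return False
def pvAdjScan : List String → Bool
  | a :: b :: t => PySem.Str.startswith b a || pvAdjScan (b :: t)
  | _ => false

def is_contain_end_of_other_alt (words_set : List String) : Bool :=
  pvAdjScan (PySem.List.sorted (words_set.map pvRev) (fun x => x) false)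

-- ===== PRECONDITION & SPEC =====
-- Pre_ states the TYPE-CONVENTION invariant of the Python parameter: words_set is a set[str],
-- encoded as a List String of its DISTINCT elements; a list with duplicates encodes no Python input.
def Pre_is_contain_end_of_other (words_set : List String) : Prop := words_set.Nodup
instance (words_set : List String) : Decidable (Pre_is_contain_end_of_other words_set) := by unfold Pre_is_contain_end_of_other; infer_instance
def pvWitness_is_contain_end_of_other : List String := ["hello", "lo", "he"]

def Spec_is_contain_end_of_other (words_set : List String) (out : Bool) : Prop := out = is_contain_end_of_other_alt words_set
instance (words_set : List String) (out : Bool) : Decidable (Spec_is_contain_end_of_other words_set out) := by unfold Spec_is_contain_end_of_other; infer_instance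

-- ===== CLAIM (what is proved, stated in full; the proofs are below) =====
def Claim_equal_is_contain_end_of_other : Prop := ∀ (words_set : List String), Dom_is_contain_end_of_other words_set → Pre_is_contain_end_of_other words_set → Spec_is_contain_end_of_other words_set (is_contain_end_of_other words_set)

-- ===== LEMMAS AND PROOFS =====

-- the common existential both programs decide: some word ends with some OTHER word
def pvE (ws : List String) : Prop :=
  ∃ w ∈ ws, ∃ s ∈ ws, w ≠ s ∧ s.toList <:+ w.toList

theorem pvRev_toList (w : String) : (pvRev w).toList = w.toList.reverse := by
  simp [pvRev, PySem.Str.slice?_none_none_neg_one]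

theorem pvRev_injective : Function.Injective pvRev := by
  intro a b h
  have h2 := congrArg String.toList h
  rw [pvRev_toList, pvRev_toList] at h2
  exact String.toList_inj.mp (List.reverse_injective h2)

theorem pvA_iff (ws : List String) :
    is_contain_end_of_other ws = true ↔ pvE ws := by
  unfold is_contain_end_of_other
  split
  · rename_i hlen
    simp only [Bool.false_eq_true, false_iff]
    rintro ⟨w, hw, s, hs, hne, -⟩
    match ws, hw, hs with
    | [], hw, _ => exact absurd hw List.not_mem_nil
    | [a], hw, hs =>
      simp only [List.mem_singleton] at hw hs
      exact hne (hw.trans hs.symm)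
    | a :: b :: t, _, _ => simp at hlen
  · simp only [List.any_eq_true, PySem.Set.mem_diff, pvE]
    constructor
    · rintro ⟨s, hs, w, ⟨hw, hwne⟩, hend⟩
      refine ⟨w, hw, s, hs, fun h => hwne (by simp [h]), ?_⟩
      exact (PySem.Chars.endswith_iff (s := w.toList) (p := s.toList)).mp (by simpa using hend)
    · rintro ⟨w, hw, s, hs, hne, hsuf⟩
      refine ⟨s, hs, w, ⟨hw, by simpa using hne⟩, ?_⟩
      simpa using (PySem.Chars.endswith_iff (s := w.toList) (p := s.toList)).mpr hsuf

-- pvAdjScan finds exactly an adjacent startswith pair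
theorem pvAdjScan_iff (L : List String) :
    pvAdjScan L = true ↔ ∃ i : Nat, ∃ h : i + 1 < L.length, L[i].toList <+: L[i + 1].toList := by
  induction L with
  | nil => simp [pvAdjScan]
  | cons a t ih =>
    match t, ih with
    | [], _ => simp [pvAdjScan]
    | b :: t, ih =>
      rw [pvAdjScan, Bool.or_eq_true, ih]
      constructor
      · rintro (h | ⟨i, hi, hp⟩)
        · exact ⟨0, by simp, by
            have h2 := (PySem.Chars.startswith_iff (s := b.toList) (p := a.toList)).mp (by simpa using h)
            simpa using h2⟩
        · exact ⟨i + 1, by simpa using hi, by simpa using hp⟩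
      · rintro ⟨i, hi, hp⟩
        match i with
        | 0 =>
          left
          simp only [List.getElem_cons_zero, List.getElem_cons_succ] at hp
          simpa using (PySem.Chars.startswith_iff (s := b.toList) (p := a.toList)).mpr hp
        | i + 1 =>
          right
          exact ⟨i, by simpa using hi, by simpa using hp⟩

-- a prefix is lexicographically ≤ (as equal-or-Lex)
theorem pvPrefix_lex_le (u v : List Char) (h : u <+: v) : u = v ∨ List.Lex (· < ·) u v := by
  induction u generalizing v with
  | nil =>
    match v with
    | [] => exact Or.inl rfl
    | b :: v => exact Or.inr List.Lex.nil
  | cons a u ih =>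
    obtain ⟨t, rfl⟩ := h
    rcases ih (u ++ t) ⟨t, rfl⟩ with h2 | h2
    · exact Or.inl (by rw [List.cons_append, ← h2])
    · exact Or.inr (List.Lex.cons h2)

-- lex sandwich: if u is a prefix of v and u <lex m <lex v, then u is a prefix of m
theorem pvSandwich (u m v : List Char) (hpre : u <+: v)
    (h1 : List.Lex (· < ·) u m) (h2 : List.Lex (· < ·) m v) : u <+: m := by
  induction u generalizing m v with
  | nil => exact List.nil_prefix
  | cons a u ih =>
    obtain ⟨t, rfl⟩ := hpre
    cases h1 with
    | cons h1 =>
      rename_i m'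
      cases h2 with
      | cons h2 => exact List.cons_prefix_cons.mpr ⟨rfl, ih m' (u ++ t) ⟨t, rfl⟩ h1 h2⟩
      | rel h2 => exact absurd h2 (lt_irrefl a)
    | rel h1 =>
      rename_i b m'
      cases h2 with
      | cons h2 => exact absurd h1 (lt_irrefl a)
      | rel h2 => exact absurd (h1.trans h2) (lt_irrefl a)

theorem pvB_iff (ws : List String) (hnd : ws.Nodup) :
    is_contain_end_of_other_alt ws = true ↔ pvE ws := by
  unfold is_contain_end_of_other_alt
  have hperm : (PySem.List.sorted (ws.map pvRev) (fun x => x) false).Perm (ws.map pvRev) :=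
    PySem.List.sorted_perm _ _ _
  set L := PySem.List.sorted (ws.map pvRev) (fun x => x) false with hL
  have hndL : L.Nodup := hperm.nodup_iff.mpr (hnd.map pvRev_injective)
  have hmemL : ∀ x, x ∈ L ↔ x ∈ ws.map pvRev := fun x => hperm.mem_iff
  have hmono : ∀ (p q : Nat), (hpq : p ≤ q) → (hq : q < L.length) → L[p]'(by omega) ≤ L[q] := by
    intro p q hpq hq
    exact PySem.List.sorted_id_getElem_mono (ws.map pvRev) hpq hq
  rw [pvAdjScan_iff]
  constructor
  · rintro ⟨i, hi, hp⟩
    have hne : L[i]'(by omega) ≠ L[i + 1] := by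
      intro h
      have := (List.Nodup.getElem_inj_iff hndL).mp h
      omega
    obtain ⟨s, hs, hseq⟩ := List.mem_map.mp ((hmemL _).mp (L.getElem_mem (show i < L.length by omega)))
    obtain ⟨w, hw, hweq⟩ := List.mem_map.mp ((hmemL _).mp (L.getElem_mem hi))
    refine ⟨w, hw, s, hs, ?_, ?_⟩
    · rintro rfl; exact hne (hseq.symm.trans hweq)
    · rw [← List.reverse_prefix, ← pvRev_toList, ← pvRev_toList, hseq, hweq]
      exact hp
  · rintro ⟨w, hw, s, hs, hne, hsuf⟩
    have hu : pvRev s ∈ L := (hmemL _).mpr (List.mem_map_of_mem hs)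
    have hv : pvRev w ∈ L := (hmemL _).mpr (List.mem_map_of_mem hw)
    obtain ⟨p, hpl, hpe⟩ := List.getElem_of_mem hu
    obtain ⟨q, hql, hqe⟩ := List.getElem_of_mem hv
    have huv : pvRev s ≠ pvRev w := fun h => hne (pvRev_injective h).symm
    have hpre' : (pvRev s).toList <+: (pvRev w).toList := by
      rw [pvRev_toList, pvRev_toList, List.reverse_prefix]; exact hsuf
    have hsw_le : pvRev s ≤ pvRev w := by
      rw [String.le_iff_toList_le]
      rcases pvPrefix_lex_le _ _ hpre' with he | hlex
      · exact le_of_eq he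
      · exact le_of_lt hlex
    have hpq : p < q := by
      rcases lt_trichotomy p q with h | h | h
      · exact h
      · exact absurd (hpe.symm.trans (by subst h; exact hqe)) (fun hh => huv hh)
      · exfalso
        have h1 := hmono q p (le_of_lt h) hpl
        rw [hpe, hqe] at h1
        exact huv (le_antisymm hsw_le h1)
    have hp1 : p + 1 < L.length := by omega
    refine ⟨p, hp1, ?_⟩
    have h1 : L[p].toList ≤ L[p + 1].toList :=
      String.le_iff_toList_le.mp (hmono p (p + 1) (by omega) hp1)
    have h2 : L[p + 1].toList ≤ L[q].toList :=
      String.le_iff_toList_le.mp (hmono (p + 1) q (by omega) hql)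
    have hpreL : L[p].toList <+: L[q].toList := by rw [hpe, hqe]; exact hpre'
    rcases lt_or_eq_of_le h1 with h1 | h1
    · rcases lt_or_eq_of_le h2 with h2 | h2
      · exact pvSandwich _ _ _ hpreL h1 h2
      · rw [h2]; exact hpreL
    · rw [← h1]

-- ===== VERDICT (by name: the statement is the Claim_ definition above) =====
theorem is_contain_end_of_other_spec : Claim_equal_is_contain_end_of_other := by
  intro ws _ hpre
  unfold Spec_is_contain_end_of_other
  rw [Bool.eq_iff_iff, pvA_iff, pvB_iff ws hpre]
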